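-- pv_equiv track=rewrite | github.com/konagy/leaf_picture_processing | picture_processing_oulema.py | session_summary
-- ===== SOURCE A (Python) =====
-- from typing import Dict, List, Optional, Sequence, Tuple
--
-- def session_summary(session_data: Optional[dict]) -> str:
--     if not session_data:
--         return "No folder selected"
--
--     counts: Dict[str, int] = {"pending": 0, "done": 0, "skipped": 0, "error": 0}
--     for item in session_data.get("files", []):
--         counts[item.get("status", "pending")] = counts.get(item.get("status", "pending"), 0) + 1
--
--     total = len(session_data.get("files", []))
--     return (
--         f"{total} files | "
--         f"{counts.get('done', 0)} done | "
--         f"{counts.get('pending', 0)} pending | "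
--         f"{counts.get('skipped', 0)} skipped | "
--         f"{counts.get('error', 0)} error"
--     )
-- ===== SOURCE B (Python) =====
-- def session_summary(session_data):
--     if not session_data:
--         return "No folder selected"
--     files = session_data.get("files", [])
--     done = sum(1 for f in files if f.get("status", "pending") == "done")
--     pending = sum(1 for f in files if f.get("status", "pending") == "pending")
--     skipped = sum(1 for f in files if f.get("status", "pending") == "skipped")
--     error = sum(1 for f in files if f.get("status", "pending") == "error")
--     return (
--         f"{len(files)} files | "
--         f"{done} done | "
--         f"{pending} pending | "
--         f"{skipped} skipped | "
--         f"{error} error"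
--     )
-- ===== Notes on version B (the rewrite author's own statement) =====
-- stated objective: idiomatic
-- what changed: Replaces the single dict-accumulating pass over the files with four independent filtered counts (one generator-sum per reported status), so no mutable counts dict exists at all.
import Mathlib
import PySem

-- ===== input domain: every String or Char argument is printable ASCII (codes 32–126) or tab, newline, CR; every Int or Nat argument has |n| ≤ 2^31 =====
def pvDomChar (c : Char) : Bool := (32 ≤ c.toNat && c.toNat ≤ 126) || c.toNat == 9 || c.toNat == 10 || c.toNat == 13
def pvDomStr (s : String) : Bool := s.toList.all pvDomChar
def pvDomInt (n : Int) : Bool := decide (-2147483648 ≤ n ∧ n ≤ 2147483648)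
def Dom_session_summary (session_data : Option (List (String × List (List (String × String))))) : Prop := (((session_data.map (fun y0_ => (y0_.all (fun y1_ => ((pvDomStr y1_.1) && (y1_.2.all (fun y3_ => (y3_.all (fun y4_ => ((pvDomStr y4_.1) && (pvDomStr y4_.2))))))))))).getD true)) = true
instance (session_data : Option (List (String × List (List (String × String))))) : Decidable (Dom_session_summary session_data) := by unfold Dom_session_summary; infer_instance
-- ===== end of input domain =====

-- B computes each reported status count with its own filtered count instead of A's single dict-accumulating pass (idiomatic, same cost).
-- ===== PORT A =====
-- item.get("status", "pending") (shared helper: both Pythons call it identically)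
def pvStatus (item : List (String × String)) : String :=
  (PySem.Dict.mk item).getD "status" "pending"

def session_summary (session_data : Option (List (String × List (List (String × String))))) : String :=
  match session_data with
  | none => "No folder selected"                    -- 'if not session_data' (None)
  | some d =>
    if d.isEmpty then "No folder selected"          -- 'if not session_data' (empty dict)
    else
      let files := (PySem.Dict.mk d).getD "files" []
      let counts :=
        files.foldl
          (fun c item => c.insert (pvStatus item) (c.getD (pvStatus item) 0 + 1))
          (PySem.Dict.ofList [("pending", (0 : Int)), ("done", 0), ("skipped", 0), ("error", 0)])
      let total : Int := ((PySem.Dict.mk d).getD "files" []).length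
      PySem.Int.toStr total ++ " files | " ++
      PySem.Int.toStr (counts.getD "done" 0) ++ " done | " ++
      PySem.Int.toStr (counts.getD "pending" 0) ++ " pending | " ++
      PySem.Int.toStr (counts.getD "skipped" 0) ++ " skipped | " ++
      PySem.Int.toStr (counts.getD "error" 0) ++ " error"

-- ===== PORT B =====
def session_summary_alt (session_data : Option (List (String × List (List (String × String))))) : String :=
  match session_data with
  | none => "No folder selected"
  | some d =>
    if d.isEmpty then "No folder selected"
    else
      let files := (PySem.Dict.mk d).getD "files" []
      let done : Int := files.countP (fun f => pvStatus f == "done")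
      let pending : Int := files.countP (fun f => pvStatus f == "pending")
      let skipped : Int := files.countP (fun f => pvStatus f == "skipped")
      let error : Int := files.countP (fun f => pvStatus f == "error")
      PySem.Int.toStr (files.length : Int) ++ " files | " ++
      PySem.Int.toStr done ++ " done | " ++
      PySem.Int.toStr pending ++ " pending | " ++
      PySem.Int.toStr skipped ++ " skipped | " ++
      PySem.Int.toStr error ++ " error"

-- ===== PRECONDITION & SPEC =====
def Spec_session_summary (session_data : Option (List (String × List (List (String × String))))) (out : String) : Prop := out = session_summary_alt session_data
instance (session_data : Option (List (String × List (List (String × String))))) (out : String) : Decidable (Spec_session_summary session_data out) := by unfold Spec_session_summary; infer_instance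

-- ===== CLAIM (what is proved, stated in full; the proofs are below) =====
def Claim_equal_session_summary : Prop := ∀ (session_data : Option (List (String × List (List (String × String))))), Dom_session_summary session_data → Spec_session_summary session_data (session_summary session_data)

-- ===== LEMMAS AND PROOFS =====

-- the counts-dict loop over the files equals the initial value plus a filtered count, per status
lemma counts_getD (files : List (List (String × String))) (c0 : PySem.Dict String Int) (s : String) :
    (files.foldl
      (fun c item => c.insert (pvStatus item) (c.getD (pvStatus item) 0 + 1)) c0).getD s 0
    = c0.getD s 0 + (files.countP (fun f => pvStatus f == s) : Int) := by
  induction files generalizing c0 with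
  | nil => simp
  | cons x xs ih =>
    simp only [List.foldl_cons, ih, PySem.Dict.getD_insert, List.countP_cons]
    by_cases h : s = pvStatus x
    · subst h; simp; ring
    · simp [h, Ne.symm h]

-- ===== VERDICT (by name: the statement is the Claim_ definition above) =====
theorem session_summary_spec : Claim_equal_session_summary := by
  intro sd _
  unfold Spec_session_summary session_summary session_summary_alt
  match sd with
  | none => rfl
  | some d =>
    dsimp only
    by_cases hd : d.isEmpty
    · simp [hd]
    rw [if_neg hd, if_neg hd]
    have h0 : ∀ k : String,
        (PySem.Dict.ofList [("pending", (0 : Int)), ("done", 0), ("skipped", 0), ("error", 0)]).getD k 0 = 0 := by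
      intro k
      simp [PySem.Dict.ofList, PySem.Dict.getD_insert, PySem.Dict.update]
    simp [counts_getD, h0]
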